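-- pv_equiv track=rewrite | github.com/marrusl/yoinkc | src/rhel2bootc/baseline.py | resolve_baseline_packages
-- ===== SOURCE A (Python) =====
-- from typing import Dict, List, Optional, Set, Tuple
--
-- def resolve_baseline_packages(
--     comps_data: Dict[str, Tuple[Set[str], List[str]]],
--     profile: str,
-- ) -> Set[str]:
--     """
--     Resolve the full set of package names for the given profile (group id).
--
--     Recursively includes packages from the group and any groupreq dependencies
--     (e.g. @server -> @core). profile should be the group id without @ (e.g. "minimal", "server").
--     """
--     seen: Set[str] = set()
--     out: Set[str] = set()
--
--     def add_group(gid: str) -> None: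
--         if gid in seen:
--             return
--         seen.add(gid)
--         if gid not in comps_data:
--             return
--         packages, groupreqs = comps_data[gid]
--         out.update(packages)
--         for req in groupreqs:
--             add_group(req)
--
--     add_group(profile)
--     return out
-- ===== SOURCE B (Python) =====
-- def resolve_baseline_packages(comps_data, profile):
--     """Iterative worklist version: an explicit stack replaces the recursion.
--
--     Requirements are pushed in reversed order so the pop order equals the
--     recursive DFS order (irrelevant for the returned set, but exact)."""
--     seen = set()
--     out = set()
--     stack = [profile]
--     while stack:
--         gid = stack.pop()
--         if gid in seen:
--             continue
--         seen.add(gid)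
--         if gid not in comps_data:
--             continue
--         packages, groupreqs = comps_data[gid]
--         out.update(packages)
--         stack.extend(reversed(groupreqs))
--     return out
-- ===== Notes on version B (the rewrite author's own statement) =====
-- stated objective: alternative
-- what changed: Replaces the recursive closure-based group traversal with an iterative explicit-stack worklist loop (no recursion, no nested function).
import Mathlib
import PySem

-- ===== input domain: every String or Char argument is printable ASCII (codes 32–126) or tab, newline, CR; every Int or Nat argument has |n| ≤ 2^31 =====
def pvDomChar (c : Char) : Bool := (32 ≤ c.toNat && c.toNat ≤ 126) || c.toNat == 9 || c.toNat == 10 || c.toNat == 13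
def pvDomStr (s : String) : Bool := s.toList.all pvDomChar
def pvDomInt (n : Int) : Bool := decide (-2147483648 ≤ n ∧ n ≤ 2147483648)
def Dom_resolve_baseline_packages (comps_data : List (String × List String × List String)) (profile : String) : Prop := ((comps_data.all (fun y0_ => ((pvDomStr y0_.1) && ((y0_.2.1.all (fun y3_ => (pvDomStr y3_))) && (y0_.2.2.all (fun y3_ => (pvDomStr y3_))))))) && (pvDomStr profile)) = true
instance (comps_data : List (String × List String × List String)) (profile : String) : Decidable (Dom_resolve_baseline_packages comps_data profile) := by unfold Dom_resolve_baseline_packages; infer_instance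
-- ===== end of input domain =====

-- A = recursive DFS over group requirements collecting packages; B = the same set computed by an
-- explicit-stack worklist loop (reversed pushes keep the DFS order). Objective: alternative decomposition.


-- dict lookup (first match): 'gid in comps_data' / 'comps_data[gid]' fused into one Option lookup (exact)
def pvGet (cd : List (String × List String × List String)) (gid : String) : Option (List String × List String) :=
  match cd with
  | [] => none
  | (k, v) :: rest => if k == gid then some v else pvGet rest gid

-- ===== PORT A =====
-- add_group: fuel makes the (terminating) Python recursion total in Lean; cd.length + 1 fuel always
-- suffices because each nested call past the seen-check records a fresh key in `seen` (proved below).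
def pvAddGroup (cd : List (String × List String × List String)) :
    Nat → String → PySem.Set String × PySem.Set String → PySem.Set String × PySem.Set String
  | 0, _, st => st
  | Nat.succ f, gid, (seen, out) =>
    if PySem.Set.contains seen gid then (seen, out)
    else
      let seen := PySem.Set.add seen gid
      match pvGet cd gid with
      | none => (seen, out)
      | some (packages, groupreqs) =>
          groupreqs.foldl (fun st req => pvAddGroup cd f req st) (seen, PySem.Set.update out packages)

def resolve_baseline_packages (comps_data : List (String × List String × List String)) (profile : String) : List String :=
  (pvAddGroup comps_data (comps_data.length + 1) profile (PySem.Set.empty, PySem.Set.empty)).2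

-- ===== PORT B =====
-- decreasing measure for the worklist loop: unvisited keys of cd, then stack length
def pvN (cd : List (String × List String × List String)) (seen : PySem.Set String) : Nat :=
  (((cd.map Prod.fst).dedup).filter (fun k => !PySem.Set.contains seen k)).length

-- lemmas the termination proof of the B port cites by name ------------------------------------
theorem pv_not_contains (s : PySem.Set String) (x : String) : s.contains x = false ↔ x ∉ s := by
  rw [Bool.eq_false_iff, Ne, PySem.Set.contains_iff]

theorem pv_filter_len_mono {α : Type} (p q : α → Bool) :
    ∀ (l : List α), (∀ a ∈ l, p a = true → q a = true) →
      (l.filter p).length ≤ (l.filter q).length := by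
  intro l
  induction l with
  | nil => intro _; simp
  | cons a tl ih =>
    intro h
    have htl := ih (fun x hx => h x (List.mem_cons_of_mem _ hx))
    by_cases hp : p a = true
    · have hq := h a (List.mem_cons_self) hp
      simp [List.filter, hp, hq]; omega
    · simp only [List.filter, Bool.not_eq_true] at *
      rw [Bool.eq_false_iff] at hp
      cases hq : q a <;> simp [hp, hq] <;> omega

theorem pv_filter_len_lt {α : Type} (p q : α → Bool) :
    ∀ (l : List α), (∀ a ∈ l, p a = true → q a = true) →
      ∀ g ∈ l, q g = true → p g = false →
      (l.filter p).length < (l.filter q).length := by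
  intro l
  induction l with
  | nil => intro _ g hg; simp at hg
  | cons a tl ih =>
    intro h g hg hq hp
    have hmono := pv_filter_len_mono p q tl (fun x hx => h x (List.mem_cons_of_mem _ hx))
    rcases List.mem_cons.mp hg with rfl | hgtl
    · simp [List.filter, hp, hq]; omega
    · have := ih (fun x hx => h x (List.mem_cons_of_mem _ hx)) g hgtl hq hp
      by_cases hpa : p a = true
      · have hqa := h a (List.mem_cons_self) hpa
        simp [List.filter, hpa, hqa]; omega
      · rw [Bool.not_eq_true, Bool.eq_false_iff] at hpa
        cases hqa : q a <;> simp [List.filter, hpa, hqa] <;> omega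

theorem pvN_mono_of_subset (cd : List (String × List String × List String))
    (s t : PySem.Set String) (h : ∀ x ∈ s, x ∈ t) : pvN cd t ≤ pvN cd s := by
  unfold pvN
  apply pv_filter_len_mono
  intro a _ ha
  simp only [Bool.not_eq_true'] at ha ⊢
  rw [pv_not_contains] at ha ⊢
  exact fun m => ha (h a m)

theorem pvN_add_le (cd : List (String × List String × List String)) (seen : PySem.Set String)
    (g : String) : pvN cd (PySem.Set.add seen g) ≤ pvN cd seen :=
  pvN_mono_of_subset cd seen (PySem.Set.add seen g)
    (fun x hx => (PySem.Set.mem_add _ _ _).mpr (Or.inl hx))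

theorem pvGet_mem_keys (cd : List (String × List String × List String)) (gid : String)
    (v : List String × List String) (h : pvGet cd gid = some v) : gid ∈ cd.map Prod.fst := by
  induction cd with
  | nil => simp [pvGet] at h
  | cons kv rest ih =>
    obtain ⟨k, w⟩ := kv
    simp only [pvGet] at h
    simp only [List.map_cons, List.mem_cons]
    by_cases hk : k == gid
    · exact Or.inl (beq_iff_eq.mp hk).symm
    · exact Or.inr (ih (by simpa [hk] using h))

theorem pvN_add_lt (cd : List (String × List String × List String)) (seen : PySem.Set String)
    (g : String) (hkey : g ∈ cd.map Prod.fst) (hns : g ∉ seen) :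
    pvN cd (PySem.Set.add seen g) < pvN cd seen := by
  unfold pvN
  apply pv_filter_len_lt
  · intro a _ ha
    simp only [Bool.not_eq_true'] at ha ⊢
    rw [pv_not_contains] at ha ⊢
    exact fun m => ha ((PySem.Set.mem_add _ _ _).mpr (Or.inl m))
  · exact List.mem_dedup.mpr hkey
  · simp only [Bool.not_eq_true']
    rw [pv_not_contains]; exact hns
  · have : PySem.Set.contains (PySem.Set.add seen g) g = true := by
      rw [PySem.Set.contains_iff]; exact (PySem.Set.mem_add _ _ _).mpr (Or.inr rfl)
    simp [this]
-- ---------------------------------------------------------------------------------------------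

-- worklist loop: stack head = top of the Python stack; extend(reversed(groupreqs)) then pop from
-- the end = prepending groupreqs, so 'groupreqs ++ rest' (exact on the returned set)
def pvStackLoop (cd : List (String × List String × List String)) :
    List String → PySem.Set String → PySem.Set String → PySem.Set String
  | [], _, out => out
  | gid :: rest, seen, out =>
    if h : PySem.Set.contains seen gid then pvStackLoop cd rest seen out
    else
      let seen' := PySem.Set.add seen gid
      match hg : pvGet cd gid with
      | none => pvStackLoop cd rest seen' out
      | some (packages, groupreqs) =>
          pvStackLoop cd (groupreqs ++ rest) seen' (PySem.Set.update out packages)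
termination_by stack seen _ => (pvN cd seen, stack.length)
decreasing_by
  · exact Prod.Lex.right _ (Nat.lt_succ_self _)
  · rcases Nat.lt_or_ge (pvN cd (PySem.Set.add seen gid)) (pvN cd seen) with hlt | hge
    · exact Prod.Lex.left _ _ hlt
    · have := pvN_add_le cd seen gid
      have heq : pvN cd (PySem.Set.add seen gid) = pvN cd seen := le_antisymm this hge
      rw [heq]; exact Prod.Lex.right _ (Nat.lt_succ_self _)
  · have hkey := pvGet_mem_keys cd gid _ hg
    rw [PySem.Set.contains_iff] at h
    exact Prod.Lex.left _ _ (pvN_add_lt cd seen gid hkey h)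

def resolve_baseline_packages_alt (comps_data : List (String × List String × List String)) (profile : String) : List String :=
  pvStackLoop comps_data [profile] PySem.Set.empty PySem.Set.empty

-- ===== PRECONDITION & SPEC =====
def Spec_resolve_baseline_packages (comps_data : List (String × List String × List String)) (profile : String) (out : List String) : Prop := out = resolve_baseline_packages_alt comps_data profile
instance (comps_data : List (String × List String × List String)) (profile : String) (out : List String) : Decidable (Spec_resolve_baseline_packages comps_data profile out) := by unfold Spec_resolve_baseline_packages; infer_instance

-- ===== CLAIM (what is proved, stated in full; the proofs are below) =====
def Claim_equal_resolve_baseline_packages : Prop := ∀ (comps_data : List (String × List String × List String)) (profile : String), Dom_resolve_baseline_packages comps_data profile → Spec_resolve_baseline_packages comps_data profile (resolve_baseline_packages comps_data profile)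

-- ===== LEMMAS AND PROOFS =====

-- the for-loop of A's key branch, as a function of its own
def pvAddList (cd : List (String × List String × List String)) (f : Nat) (gids : List String)
    (st : PySem.Set String × PySem.Set String) : PySem.Set String × PySem.Set String :=
  gids.foldl (fun st req => pvAddGroup cd f req st) st

theorem pvAddGroup_seen_mono (cd : List (String × List String × List String)) :
    ∀ (f : Nat) (g : String) (st : PySem.Set String × PySem.Set String) (x : String),
      x ∈ st.1 → x ∈ (pvAddGroup cd f g st).1 := by
  intro f
  induction f with
  | zero => intro g st x hx; simpa [pvAddGroup] using hx
  | succ f ih =>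
    intro g st x hx
    obtain ⟨seen, out⟩ := st
    by_cases hm : g ∈ seen
    · simpa [pvAddGroup, hm] using hx
    · have hadd : x ∈ PySem.Set.add seen g := (PySem.Set.mem_add _ _ _).mpr (Or.inl hx)
      cases hg : pvGet cd g with
      | none => simpa [pvAddGroup, hm, hg] using hadd
      | some v =>
        obtain ⟨packages, groupreqs⟩ := v
        have hfold : ∀ (l : List String) (s : PySem.Set String × PySem.Set String), x ∈ s.1 →
            x ∈ (l.foldl (fun st req => pvAddGroup cd f req st) s).1 := by
          intro l
          induction l with
          | nil => intro s hs; simpa using hs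
          | cons a tl ihl => intro s hs; exact ihl _ (ih a s x hs)
        simpa [pvAddGroup, hm, hg] using
          hfold groupreqs (PySem.Set.add seen g, PySem.Set.update out packages) hadd

theorem pvAddList_seen_mono (cd : List (String × List String × List String)) (f : Nat) :
    ∀ (gids : List String) (st : PySem.Set String × PySem.Set String) (x : String),
      x ∈ st.1 → x ∈ (pvAddList cd f gids st).1 := by
  intro gids
  induction gids with
  | nil => intro st x hx; simpa [pvAddList] using hx
  | cons g gs ih =>
    intro st x hx
    simp only [pvAddList, List.foldl_cons]
    exact ih _ x (pvAddGroup_seen_mono cd f g st x hx)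

-- the simulation: running the worklist on 'gids ++ rest' = A's for-loop over gids, then the rest
theorem pv_main (cd : List (String × List String × List String)) :
    ∀ (N : Nat) (gids : List String) (seen out : PySem.Set String) (rest : List String) (f : Nat),
      pvN cd seen ≤ N → N + 1 ≤ f →
      pvStackLoop cd (gids ++ rest) seen out =
        pvStackLoop cd rest (pvAddList cd f gids (seen, out)).1 (pvAddList cd f gids (seen, out)).2 := by
  intro N
  induction N using Nat.strong_induction_on with
  | _ N ihN =>
    intro gids
    induction gids with
    | nil => intro seen out rest f _ _; simp [pvAddList]
    | cons g gs ihg =>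
      intro seen out rest f hN hf
      obtain ⟨f, rfl⟩ : ∃ f', f = f' + 1 := ⟨f - 1, by omega⟩
      have hstep : pvAddList cd (f + 1) (g :: gs) (seen, out)
          = pvAddList cd (f + 1) gs (pvAddGroup cd (f + 1) g (seen, out)) := by
        simp [pvAddList]
      by_cases hm : g ∈ seen
      · -- already seen: both sides skip g
        have hB : pvStackLoop cd ((g :: gs) ++ rest) seen out = pvStackLoop cd (gs ++ rest) seen out := by
          rw [List.cons_append, pvStackLoop]; simp [hm]
        have hA : pvAddGroup cd (f + 1) g (seen, out) = (seen, out) := by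
          simp [pvAddGroup, hm]
        rw [hB, hstep, hA]
        exact ihg seen out rest (f + 1) hN hf
      · cases hg : pvGet cd g with
        | none =>
          -- g marked seen, not a key: both sides move on
          have hB : pvStackLoop cd ((g :: gs) ++ rest) seen out
              = pvStackLoop cd (gs ++ rest) (PySem.Set.add seen g) out := by
            rw [List.cons_append, pvStackLoop]; simp [hm]
            split <;> simp_all
          have hA : pvAddGroup cd (f + 1) g (seen, out) = (PySem.Set.add seen g, out) := by
            simp [pvAddGroup, hm, hg]
          rw [hB, hstep, hA]
          exact ihg (PySem.Set.add seen g) out rest (f + 1)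
            (le_trans (pvN_add_le cd seen g) hN) hf
        | some v =>
          obtain ⟨packages, groupreqs⟩ := v
          -- g is an unvisited key: the measure drops, use the strong IH at N - 1
          have hkey := pvGet_mem_keys cd g _ hg
          have hlt := pvN_add_lt cd seen g hkey hm
          have hN1 : 1 ≤ N := by omega
          have hNa : pvN cd (PySem.Set.add seen g) ≤ N - 1 := by omega
          set st' := pvAddList cd f groupreqs (PySem.Set.add seen g, PySem.Set.update out packages)
            with hst'
          have hB : pvStackLoop cd ((g :: gs) ++ rest) seen out
              = pvStackLoop cd (groupreqs ++ (gs ++ rest)) (PySem.Set.add seen g)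
                  (PySem.Set.update out packages) := by
            rw [List.cons_append, pvStackLoop]; simp [hm]
            split <;> simp_all
          have h1 : pvStackLoop cd (groupreqs ++ (gs ++ rest)) (PySem.Set.add seen g)
              (PySem.Set.update out packages) = pvStackLoop cd (gs ++ rest) st'.1 st'.2 :=
            ihN (N - 1) (by omega) groupreqs (PySem.Set.add seen g)
              (PySem.Set.update out packages) (gs ++ rest) f hNa (by omega)
          have hsub : ∀ x ∈ PySem.Set.add seen g, x ∈ st'.1 := fun x hx =>
            pvAddList_seen_mono cd f groupreqs _ x hx
          have hNst' : pvN cd st'.1 ≤ N - 1 :=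
            le_trans (pvN_mono_of_subset cd (PySem.Set.add seen g) st'.1 hsub) hNa
          have h2 : pvStackLoop cd (gs ++ rest) st'.1 st'.2
              = pvStackLoop cd rest (pvAddList cd (f + 1) gs st').1
                  (pvAddList cd (f + 1) gs st').2 :=
            ihN (N - 1) (by omega) gs st'.1 st'.2 rest (f + 1) hNst' (by omega)
          have hA : pvAddGroup cd (f + 1) g (seen, out) = st' := by
            simp [pvAddGroup, hm, hg, pvAddList, hst']
          rw [hB, h1, h2, hstep, hA]

-- ===== VERDICT (by name: the statement is the Claim_ definition above) =====
theorem resolve_baseline_packages_spec : Claim_equal_resolve_baseline_packages := by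
  intro cd profile _
  unfold Spec_resolve_baseline_packages resolve_baseline_packages resolve_baseline_packages_alt
  have hN : pvN cd PySem.Set.empty ≤ cd.length := by
    unfold pvN
    calc (((cd.map Prod.fst).dedup).filter _).length
        ≤ ((cd.map Prod.fst).dedup).length := List.length_filter_le _ _
      _ ≤ (cd.map Prod.fst).length := List.Sublist.length_le (List.dedup_sublist _)
      _ = cd.length := List.length_map ..
  have hmain := pv_main cd cd.length [profile] PySem.Set.empty PySem.Set.empty [] (cd.length + 1)
    hN (le_refl _)
  simp only [List.append_nil] at hmain
  rw [hmain, pvStackLoop]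
  simp [pvAddList]
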